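-- pv_equiv track=rewrite | github.com/ansible/eda-server | scripts/check_openapi_compliance.py | _endpoints_match
-- ===== SOURCE A (Python) =====
-- def _endpoints_match(expected, actual):
--     """Check if expected endpoint pattern matches actual endpoint."""
--     # Normalize both endpoints
--     expected_normalized = expected.strip("/")
--     actual_normalized = actual.strip("/")
--
--     # Direct match
--     if expected_normalized == actual_normalized:
--         return True
--
--     # Pattern matching for parameters
--     expected_parts = expected_normalized.split("/")
--     actual_parts = actual_normalized.split("/")
--
--     if len(expected_parts) != len(actual_parts):
--         return False
--
--     for exp_part, act_part in zip(expected_parts, actual_parts):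
--         # If expected part is a parameter placeholder, it should match
--         if exp_part.startswith("{") and exp_part.endswith("}"):
--             continue
--         # Otherwise, parts should match exactly
--         elif exp_part != act_part:
--             return False
--
--     return True
-- ===== SOURCE B (Python) =====
-- def _segments_agree(e, a):
--     """Recursively match one segment at a time via str.partition."""
--     e_head, e_sep, e_rest = e.partition("/")
--     a_head, a_sep, a_rest = a.partition("/")
--     if not (e_head.startswith("{") and e_head.endswith("}")) and e_head != a_head:
--         return False
--     if e_sep and a_sep:
--         return _segments_agree(e_rest, a_rest)
--     return not e_sep and not a_sep
--
--
-- def _endpoints_match(expected, actual):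
--     """Check if expected endpoint pattern matches actual endpoint."""
--     return _segments_agree(expected.strip("/"), actual.strip("/"))
-- ===== Notes on version B (the rewrite author's own statement) =====
-- stated objective: alternative
-- what changed: Replaces A's split-into-lists + length comparison + zip loop (plus a direct-equality short-circuit) by a single recursion that peels one segment off each string with str.partition, deciding mismatch, length mismatch and termination segment by segment.
import Mathlib
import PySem

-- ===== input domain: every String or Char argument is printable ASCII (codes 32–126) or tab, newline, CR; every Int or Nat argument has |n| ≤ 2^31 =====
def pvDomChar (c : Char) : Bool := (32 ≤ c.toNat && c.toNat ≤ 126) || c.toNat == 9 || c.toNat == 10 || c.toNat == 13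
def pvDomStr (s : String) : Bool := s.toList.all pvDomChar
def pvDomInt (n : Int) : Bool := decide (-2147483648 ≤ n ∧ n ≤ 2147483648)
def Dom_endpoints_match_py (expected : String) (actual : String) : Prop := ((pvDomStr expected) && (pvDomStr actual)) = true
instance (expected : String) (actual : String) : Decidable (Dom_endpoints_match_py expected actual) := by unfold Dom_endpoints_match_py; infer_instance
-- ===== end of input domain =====

-- A splits both paths into lists, compares lengths and loops over the zip (after a direct-equality
-- short-circuit); B instead recurses segment by segment with str.partition. Objective: alternative
-- (same cost, different decomposition).


-- ===== PORT A =====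
-- the `for exp_part, act_part in zip(...)` loop with its early `return False`
def pyCheckParts : List (List Char × List Char) → Bool
  | [] => true
  | (e, a) :: rest =>
    if PySem.Chars.startswith e ['{'] && PySem.Chars.endswith e ['}'] then pyCheckParts rest
    else if e ≠ a then false
    else pyCheckParts rest

def endpoints_match_py (expected : String) (actual : String) : Bool :=
  let expectedNormalized := PySem.Chars.stripChars expected.toList ['/']
  let actualNormalized := PySem.Chars.stripChars actual.toList ['/']
  if expectedNormalized = actualNormalized then true
  else
    let expectedParts := PySem.Chars.splitOn expectedNormalized ['/']
    let actualParts := PySem.Chars.splitOn actualNormalized ['/']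
    if expectedParts.length ≠ actualParts.length then false
    else pyCheckParts (expectedParts.zip actualParts)

-- ===== PORT B =====
-- s.partition("/") for the one-char separator "/": (head segment, rest after the first '/' if any)
def partSlash : List Char → List Char × Option (List Char)
  | [] => ([], none)
  | c :: rest =>
    if c = '/' then ([], some rest)
    else
      let (h, t) := partSlash rest
      (c :: h, t)

theorem partSlash_some_lt : ∀ (e r : List Char), (partSlash e).2 = some r → r.length < e.length
  | [], r => by simp [partSlash]
  | c :: rest, r => by
    by_cases hc : c = '/'
    · simp only [partSlash, if_pos hc]
      rintro ⟨rfl⟩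
      simp
    · simp only [partSlash, if_neg hc]
      intro h
      have := partSlash_some_lt rest r h
      simp only [List.length_cons]
      omega

-- _segments_agree from Source B
def segsAgree (e a : List Char) : Bool :=
  let eHead := (partSlash e).1
  let aHead := (partSlash a).1
  if !(PySem.Chars.startswith eHead ['{'] && PySem.Chars.endswith eHead ['}']) && eHead ≠ aHead then
    false
  else
    match he : (partSlash e).2, (partSlash a).2 with
    | some eRest, some aRest => segsAgree eRest aRest
    | none, none => true
    | _, _ => false
termination_by e.length
decreasing_by exact partSlash_some_lt e eRest he

def endpoints_match_py_alt (expected : String) (actual : String) : Bool :=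
  segsAgree (PySem.Chars.stripChars expected.toList ['/']) (PySem.Chars.stripChars actual.toList ['/'])

-- ===== PRECONDITION & SPEC =====
def Spec_endpoints_match_py (expected : String) (actual : String) (out : Bool) : Prop := out = endpoints_match_py_alt expected actual
instance (expected : String) (actual : String) (out : Bool) : Decidable (Spec_endpoints_match_py expected actual out) := by unfold Spec_endpoints_match_py; infer_instance

-- ===== CLAIM (what is proved, stated in full; the proofs are below) =====
def Claim_equal_endpoints_match_py : Prop := ∀ (expected : String) (actual : String), Dom_endpoints_match_py expected actual → Spec_endpoints_match_py expected actual (endpoints_match_py expected actual)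

-- ===== LEMMAS AND PROOFS =====

-- structural version of split-on-'/'
def splitSlash : List Char → List (List Char)
  | [] => [[]]
  | c :: rest => if c = '/' then [] :: splitSlash rest else (splitSlash rest).modifyHead (c :: ·)

theorem splitSlash_ne_nil (e : List Char) : splitSlash e ≠ [] := by
  cases e with
  | nil => simp [splitSlash]
  | cons c rest =>
    by_cases hc : c = '/' <;> simp only [splitSlash, hc, if_true, if_false]
    · simp
    · cases h : splitSlash rest with
      | nil => exact absurd h (splitSlash_ne_nil rest)
      | cons x xs => simp

theorem modifyHead_nil_append (l : List (List Char)) :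
    l.modifyHead (fun x => ([] : List Char) ++ x) = l := by
  cases l <;> simp

theorem splitOn_go_slash : ∀ (l : List Char) (fuel : Nat) (cur : List Char) (acc : List (List Char)),
    l.length ≤ fuel →
    PySem.Chars.splitOn.go ['/'] fuel l cur acc
      = acc.reverse ++ (splitSlash l).modifyHead (cur.reverse ++ ·) := by
  intro l
  induction l with
  | nil =>
    intro fuel cur acc _
    cases fuel <;> simp [PySem.Chars.splitOn.go, splitSlash]
  | cons c rest ih =>
    intro fuel cur acc hfuel
    cases fuel with
    | zero => simp at hfuel
    | succ f =>
      have hf : rest.length ≤ f := by simpa using Nat.le_of_succ_le_succ hfuel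
      by_cases hc : c = '/'
      · subst hc
        rw [PySem.Chars.splitOn.go]
        have hpre : List.isPrefixOf ['/'] ('/' :: rest) = true := by
          simp [List.isPrefixOf]
        simp only [hpre, if_true, List.length_cons, List.length_nil, List.drop_succ_cons, List.drop_zero]
        rw [ih f [] (cur.reverse :: acc) hf]
        simp only [splitSlash, if_true, List.reverse_cons, List.reverse_nil,
          List.nil_append, List.modifyHead_cons, List.append_nil, List.append_assoc,
          List.singleton_append]
        cases splitSlash rest <;> simp
      · rw [PySem.Chars.splitOn.go]
        have hpre : List.isPrefixOf ['/'] (c :: rest) = false := by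
          simp [List.isPrefixOf]
          exact fun h => absurd h.symm hc
        simp only [hpre, Bool.false_eq_true, if_false]
        rw [ih f (c :: cur) acc hf]
        congr 1
        simp only [splitSlash, hc, if_false]
        cases h : splitSlash rest with
        | nil => exact absurd h (splitSlash_ne_nil rest)
        | cons x xs => simp

theorem splitOn_slash (cs : List Char) : PySem.Chars.splitOn cs ['/'] = splitSlash cs := by
  rw [PySem.Chars.splitOn, splitOn_go_slash cs (cs.length + 1) [] [] (Nat.le_succ _)]
  simpa using modifyHead_nil_append (splitSlash cs)

theorem splitSlash_part (e : List Char) :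
    splitSlash e = (partSlash e).1
      :: (match (partSlash e).2 with | none => [] | some r => splitSlash r) := by
  induction e with
  | nil => simp [splitSlash, partSlash]
  | cons c rest ih =>
    by_cases hc : c = '/'
    · subst hc; simp [splitSlash, partSlash]
    · simp only [splitSlash, partSlash, hc, if_false]
      rw [ih]
      simp

theorem pyCheckParts_cons_pass {eh ah : List Char}
    (h : (!(PySem.Chars.startswith eh ['{'] && PySem.Chars.endswith eh ['}']) &&
      decide (eh ≠ ah)) = false) (rest : List (List Char × List Char)) :
    pyCheckParts ((eh, ah) :: rest) = pyCheckParts rest := by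
  simp only [pyCheckParts]
  by_cases hp : (PySem.Chars.startswith eh ['{'] && PySem.Chars.endswith eh ['}']) = true
  · simp [hp]
  · have heq : eh = ah := by
      cases hb : (PySem.Chars.startswith eh ['{'] && PySem.Chars.endswith eh ['}']) with
      | true => exact absurd hb hp
      | false => simp [hb] at h; exact h
    simp [heq]

theorem pyCheckParts_zip_self : ∀ xs : List (List Char), pyCheckParts (xs.zip xs) = true
  | [] => by simp [pyCheckParts]
  | x :: xs => by
    simp only [List.zip_cons_cons, pyCheckParts]
    by_cases hp : (PySem.Chars.startswith x ['{'] && PySem.Chars.endswith x ['}']) = true <;>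
      simp [hp, pyCheckParts_zip_self xs]

theorem segsAgree_main : ∀ (n : Nat) (e a : List Char), e.length ≤ n →
    segsAgree e a = if (splitSlash e).length = (splitSlash a).length
                    then pyCheckParts ((splitSlash e).zip (splitSlash a)) else false := by
  intro n
  induction n with
  | zero =>
    intro e a he
    have he0 : e = [] := by cases e <;> simp_all
    subst he0
    rw [segsAgree, splitSlash_part [], splitSlash_part a]
    cases ha : (partSlash a).2 <;>
      simp [partSlash, pyCheckParts, splitSlash_ne_nil]
  | succ n ih =>
    intro e a he
    rw [segsAgree, splitSlash_part e, splitSlash_part a]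
    cases hph : (!(PySem.Chars.startswith (partSlash e).1 ['{'] &&
        PySem.Chars.endswith (partSlash e).1 ['}']) && decide ((partSlash e).1 ≠ (partSlash a).1)) with
    | true =>
      -- head mismatch, not a placeholder: both sides false
      have h1 : (PySem.Chars.startswith (partSlash e).1 ['{'] &&
          PySem.Chars.endswith (partSlash e).1 ['}']) = false := by
        cases hx : (PySem.Chars.startswith (partSlash e).1 ['{'] &&
            PySem.Chars.endswith (partSlash e).1 ['}']) <;> simp_all
      have h2 : (partSlash e).1 ≠ (partSlash a).1 := by
        rcases (Bool.and_eq_true _ _).mp hph with ⟨_, h⟩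
        exact of_decide_eq_true h
      simp [pyCheckParts, h1, h2]
    | false =>
      simp only [Bool.false_eq_true, if_false]
      cases het : (partSlash e).2 with
      | none =>
        cases hat : (partSlash a).2 with
        | none => simp [pyCheckParts_cons_pass hph, pyCheckParts]
        | some r =>
          cases hr : splitSlash r with
          | nil => exact absurd hr (splitSlash_ne_nil r)
          | cons x xs => simp [hr]
      | some er =>
        cases hat : (partSlash a).2 with
        | none =>
          cases hr : splitSlash er with
          | nil => exact absurd hr (splitSlash_ne_nil er)
          | cons x xs => simp [hr]
        | some ar =>
          have hlt : er.length < e.length := partSlash_some_lt e er het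
          change segsAgree er ar = _
          rw [ih er ar (by omega)]
          simp only [List.length_cons, List.zip_cons_cons]
          rw [pyCheckParts_cons_pass hph]
          by_cases hl : (splitSlash er).length = (splitSlash ar).length <;> simp [hl]

theorem segsAgree_refl (a : List Char) : segsAgree a a = true := by
  rw [segsAgree_main a.length a a (le_refl _)]
  simp [pyCheckParts_zip_self]

-- ===== VERDICT (by name: the statement is the Claim_ definition above) =====
theorem endpoints_match_py_spec : Claim_equal_endpoints_match_py := by
  intro expected actual _
  unfold Spec_endpoints_match_py endpoints_match_py endpoints_match_py_alt
  set en := PySem.Chars.stripChars expected.toList ['/'] with hen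
  set an := PySem.Chars.stripChars actual.toList ['/'] with han
  by_cases h : en = an
  · simp only [h, if_true]
    exact (segsAgree_refl an).symm
  · simp only [h, if_false, splitOn_slash]
    rw [segsAgree_main en.length en an (le_refl _)]
    by_cases hl : (splitSlash en).length = (splitSlash an).length <;> simp [hl]
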